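-- pv_equiv track=rewrite | github.com/Ell1Ot-rgb/-...Raiz-Dasein | YO estructural/analizador_textos/procesador_fenomenologico.py | _determinar_nivel_yo_maximo
-- ===== SOURCE A (Python) =====
-- def _determinar_nivel_yo_maximo(tipos_detectados: set) -> int:
--     """Determina el nivel máximo del YO detectado"""
--     jerarquia_yo = {
--         'proto_yo': 0,
--         'yo_sensorial': 1,
--         'yo_afectivo': 2,
--         'yo_reflexivo': 3,
--         'yo_simbolico': 4,
--         'yo_narrativo': 5
--     }
--
--     if not tipos_detectados:
--         return 0
--
--     return max(jerarquia_yo.get(tipo, 0) for tipo in tipos_detectados)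
-- ===== SOURCE B (Python) =====
-- _JERARQUIA_DESC = (
--     ("yo_narrativo", 5),
--     ("yo_simbolico", 4),
--     ("yo_reflexivo", 3),
--     ("yo_afectivo", 2),
--     ("yo_sensorial", 1),
--     ("proto_yo", 0),
-- )
--
--
-- def _determinar_nivel_yo_maximo(tipos_detectados: set) -> int:
--     """Scan the hierarchy from highest to lowest; first type present wins."""
--     for tipo, nivel in _JERARQUIA_DESC:
--         if tipo in tipos_detectados:
--             return nivel
--     return 0
-- ===== Notes on version B (the rewrite author's own statement) =====
-- stated objective: alternative
-- what changed: Instead of taking the max of dict lookups over the detected types, B walks the fixed hierarchy in descending priority and returns the level of the first type present (0 if none), replacing the max-accumulator over the input with an early-return scan over the hierarchy.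
import Mathlib
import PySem

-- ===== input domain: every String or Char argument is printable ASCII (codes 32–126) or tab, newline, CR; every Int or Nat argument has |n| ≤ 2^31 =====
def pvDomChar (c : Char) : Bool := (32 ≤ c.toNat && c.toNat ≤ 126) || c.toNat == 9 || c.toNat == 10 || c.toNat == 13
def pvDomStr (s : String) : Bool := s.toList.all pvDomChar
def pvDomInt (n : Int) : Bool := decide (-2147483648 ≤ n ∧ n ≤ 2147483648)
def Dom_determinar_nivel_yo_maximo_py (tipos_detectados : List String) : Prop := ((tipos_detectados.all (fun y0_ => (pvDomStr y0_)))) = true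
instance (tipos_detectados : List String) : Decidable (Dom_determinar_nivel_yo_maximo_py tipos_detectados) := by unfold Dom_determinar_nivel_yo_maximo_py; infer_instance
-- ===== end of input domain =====

-- B replaces A's max over dict lookups by a descending scan of the fixed hierarchy with early return (objective: alternative).

-- ===== PORT A =====
-- the dict literal jerarquia_yo
def jerarquia_yo : PySem.Dict String Int :=
  PySem.Dict.ofList [("proto_yo", 0), ("yo_sensorial", 1), ("yo_afectivo", 2),
                     ("yo_reflexivo", 3), ("yo_simbolico", 4), ("yo_narrativo", 5)]

-- max(gen) over a nonempty iterable = foldl max over the tail starting from the head's value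
def determinar_nivel_yo_maximo_py (tipos_detectados : List String) : Int :=
  match tipos_detectados with
  | [] => 0
  | t :: rest => rest.foldl (fun m tipo => max m (jerarquia_yo.getD tipo 0)) (jerarquia_yo.getD t 0)

-- ===== PORT B =====
def jerarquia_desc : List (String × Int) :=
  [("yo_narrativo", 5), ("yo_simbolico", 4), ("yo_reflexivo", 3),
   ("yo_afectivo", 2), ("yo_sensorial", 1), ("proto_yo", 0)]

-- the for-loop with early return over the fixed hierarchy
def scan_jerarquia (pairs : List (String × Int)) (tipos_detectados : List String) : Int :=
  match pairs with
  | [] => 0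
  | (tipo, nivel) :: rest =>
      if tipos_detectados.contains tipo then nivel else scan_jerarquia rest tipos_detectados

def determinar_nivel_yo_maximo_py_alt (tipos_detectados : List String) : Int :=
  scan_jerarquia jerarquia_desc tipos_detectados

-- ===== PRECONDITION & SPEC =====
def Spec_determinar_nivel_yo_maximo_py (tipos_detectados : List String) (out : Int) : Prop := out = determinar_nivel_yo_maximo_py_alt tipos_detectados
instance (tipos_detectados : List String) (out : Int) : Decidable (Spec_determinar_nivel_yo_maximo_py tipos_detectados out) := by unfold Spec_determinar_nivel_yo_maximo_py; infer_instance

-- ===== CLAIM (what is proved, stated in full; the proofs are below) =====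
def Claim_equal_determinar_nivel_yo_maximo_py : Prop := ∀ (tipos_detectados : List String), Dom_determinar_nivel_yo_maximo_py tipos_detectados → Spec_determinar_nivel_yo_maximo_py tipos_detectados (determinar_nivel_yo_maximo_py tipos_detectados)

-- ===== LEMMAS AND PROOFS =====

-- the literal dict behind jerarquia_yo
theorem jer_eq : jerarquia_yo = PySem.Dict.mk
    [("proto_yo", 0), ("yo_sensorial", 1), ("yo_afectivo", 2),
     ("yo_reflexivo", 3), ("yo_simbolico", 4), ("yo_narrativo", 5)] := by decide

-- closed form of A's lookup
theorem getD_jer (t : String) : jerarquia_yo.getD t 0 =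
    if t = "yo_narrativo" then 5 else if t = "yo_simbolico" then 4
    else if t = "yo_reflexivo" then 3 else if t = "yo_afectivo" then 2
    else if t = "yo_sensorial" then 1 else 0 := by
  rw [jer_eq, PySem.Dict.getD_eq_get?_getD]
  simp only [PySem.Dict.get?_mk_cons, beq_iff_eq]
  split_ifs <;> first | rfl | (exfalso; simp_all)

-- closed form of B
theorem alt_eq (l : List String) : determinar_nivel_yo_maximo_py_alt l =
    if l.contains "yo_narrativo" then 5 else if l.contains "yo_simbolico" then 4
    else if l.contains "yo_reflexivo" then 3 else if l.contains "yo_afectivo" then 2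
    else if l.contains "yo_sensorial" then 1 else if l.contains "proto_yo" then 0 else 0 := rfl

-- B absorbs a new element as a max with its level
theorem alt_cons (x : String) (l : List String) :
    determinar_nivel_yo_maximo_py_alt (x :: l) =
      max (jerarquia_yo.getD x 0) (determinar_nivel_yo_maximo_py_alt l) := by
  rw [alt_eq, alt_eq, getD_jer]
  simp only [List.contains_cons]
  by_cases h5 : x = "yo_narrativo" <;>
    by_cases h4 : x = "yo_simbolico" <;>
      by_cases h3 : x = "yo_reflexivo" <;>
        by_cases h2 : x = "yo_afectivo" <;>
          by_cases h1 : x = "yo_sensorial" <;>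
            by_cases h0 : x = "proto_yo" <;>
              simp_all <;> split_ifs <;> simp_all

-- A's lookup is nonnegative
theorem getD_jerarquia_nonneg (t : String) : 0 ≤ jerarquia_yo.getD t 0 := by
  rw [getD_jer]; split_ifs <;> norm_num

-- B's value is nonnegative
theorem alt_nonneg (l : List String) : 0 ≤ determinar_nivel_yo_maximo_py_alt l := by
  rw [alt_eq]; split_ifs <;> norm_num

-- A's fold starting at a nonnegative accumulator equals max with B's answer
theorem fold_eq_max_alt (l : List String) :
    ∀ a : Int, 0 ≤ a →
      l.foldl (fun m tipo => max m (jerarquia_yo.getD tipo 0)) a =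
        max a (determinar_nivel_yo_maximo_py_alt l) := by
  induction l with
  | nil =>
      intro a ha
      have h0 : determinar_nivel_yo_maximo_py_alt [] = 0 := by decide
      simp [h0]
      omega
  | cons t rest ih =>
      intro a ha
      have hstep := ih (max a (jerarquia_yo.getD t 0))
        (le_trans ha (le_max_left _ _))
      simp only [List.foldl_cons]
      rw [hstep, alt_cons]
      have := alt_nonneg rest
      have := getD_jerarquia_nonneg t
      omega

-- ===== VERDICT (by name: the statement is the Claim_ definition above) =====
theorem determinar_nivel_yo_maximo_py_spec : Claim_equal_determinar_nivel_yo_maximo_py := by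
  intro tipos _
  unfold Spec_determinar_nivel_yo_maximo_py
  match tipos with
  | [] => decide
  | t :: rest =>
      show determinar_nivel_yo_maximo_py (t :: rest) = _
      simp only [determinar_nivel_yo_maximo_py]
      rw [fold_eq_max_alt rest _ (getD_jerarquia_nonneg t), alt_cons]
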